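-- pv_equiv track=rewrite | github.com/HIllya51/LunaTranslator | old/dependence/js2py/translators/friendly_nodes.py | bracket_split
-- ===== SOURCE A (Python) =====
-- def bracket_split(source, brackets=('()', '{}', '[]'), strip=False):
--     """DOES NOT RETURN EMPTY STRINGS (can only return empty bracket content if strip=True)"""
--     starts = [e[0] for e in brackets]
--     in_bracket = 0
--     n = 0
--     last = 0
--     while n < len(source):
--         e = source[n]
--         if not in_bracket and e in starts:
--             in_bracket = 1
--             start = n
--             b_start, b_end = brackets[starts.index(e)]
--         elif in_bracket:
--             if e == b_start:
--                 in_bracket += 1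
--             elif e == b_end:
--                 in_bracket -= 1
--                 if not in_bracket:
--                     if source[last:start]:
--                         yield source[last:start]
--                     last = n + 1
--                     yield source[start + strip:n + 1 - strip]
--         n += 1
--     if source[last:]:
--         yield source[last:]
-- ===== SOURCE B (Python) =====
-- def bracket_split(source, brackets=('()', '{}', '[]'), strip=False):
--     """DOES NOT RETURN EMPTY STRINGS (can only return empty bracket content if strip=True)"""
--     open_of = {}
--     for b in brackets:
--         open_of.setdefault(b[0], b)
--     s = int(strip)
--     last = 0
--     while True:
--         # jump straight to the earliest top-level opening bracket with str.find
--         hits = [i for i in (source.find(b[0], last) for b in brackets) if i >= 0]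
--         if not hits:
--             break
--         start = min(hits)
--         b_open, b_close = open_of[source[start]]
--         if b_open == b_close:
--             break  # such a pair can never close (every occurrence reads as an opener)
--         # jump between occurrences of the closing char; the matching one is the first
--         # where the span is balanced, tested arithmetically with str.count
--         j = source.find(b_close, start + 1)
--         while j >= 0 and source.count(b_open, start, j) != source.count(b_close, start + 1, j + 1):
--             j = source.find(b_close, j + 1)
--         if j < 0:
--             break
--         if start > last:
--             yield source[last:start]
--         yield source[start + s:j + 1 - s]
--         last = j + 1
--     if source[last:]:
--         yield source[last:]
-- ===== Notes on version B (the rewrite author's own statement) =====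
-- stated objective: alternative
-- what changed: A's per-character depth state machine is replaced by occurrence jumping: str.find locates the earliest top-level opener and then jumps between occurrences of the closing char, testing the matching one arithmetically with str.count balance equations instead of maintaining a depth counter (C-level string scans replace the per-char Python loop).
-- outside the precondition, e.g. on bracket_split('(a)', ['()', '(xx'], False): A returns ['(a)'], B returns ['(a)']
import Mathlib
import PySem

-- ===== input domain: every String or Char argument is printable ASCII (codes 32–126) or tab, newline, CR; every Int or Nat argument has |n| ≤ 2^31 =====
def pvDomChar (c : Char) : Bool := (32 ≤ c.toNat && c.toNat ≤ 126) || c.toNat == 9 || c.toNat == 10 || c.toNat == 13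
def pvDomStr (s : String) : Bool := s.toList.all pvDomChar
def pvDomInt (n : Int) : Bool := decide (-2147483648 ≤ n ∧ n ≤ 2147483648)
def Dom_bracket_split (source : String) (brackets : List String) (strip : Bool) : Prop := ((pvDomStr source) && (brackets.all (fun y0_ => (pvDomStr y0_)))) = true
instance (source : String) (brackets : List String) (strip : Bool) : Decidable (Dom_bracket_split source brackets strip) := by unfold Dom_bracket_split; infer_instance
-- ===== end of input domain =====

-- B replaces A's per-character depth state machine by occurrence jumping: str.find locates the
-- earliest top-level opener, then jumps between occurrences of the closing char, testing the
-- matching one with str.count balance equations (objective: alternative).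
-- Both Pythons are generators; the equivalence is about the yielded sequence, materialised as a list.

-- ===== PORT A =====
-- source[a:b] for nonnegative a, b (Python's slice clamping = drop/take)
def pvSl (cs : List Char) (a b : Nat) : List Char := (cs.drop a).take (b - a)

-- A's while loop; state (n, in_bracket, last, start, b_start, b_end, yielded-so-far).
-- fuel is a pure totality device: it is called with fuel = cs.length - n, so 'fuel = 0'
-- is exactly Python's loop exit 'n ≥ len(source)'. getD-placeholders are only read where
-- Python's values are defined (guaranteed by Pre_).
def pvLoopA (cs starts : List Char) (brackets : List String) (strip : Nat) :
    Nat → Nat → Nat → Nat → Nat → Char → Char → List String → List String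
  | 0, _n, _inb, last, _start, _bs, _be, acc =>
    acc ++ (if pvSl cs last cs.length = [] then [] else [String.ofList (pvSl cs last cs.length)])
  | fuel+1, n, inb, last, start, bs, be, acc =>
    let e := cs.getD n ' '
    if inb = 0 ∧ e ∈ starts then
      let b := (brackets.getD (starts.idxOf e) "").toList
      pvLoopA cs starts brackets strip fuel (n+1) 1 last n (b.getD 0 ' ') (b.getD 1 ' ') acc
    else if inb ≠ 0 then
      if e = bs then pvLoopA cs starts brackets strip fuel (n+1) (inb+1) last start bs be acc
      else if e = be then
        if inb = 1 then
          pvLoopA cs starts brackets strip fuel (n+1) 0 (n+1) start bs be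
            ((acc ++ (if pvSl cs last start = [] then [] else [String.ofList (pvSl cs last start)])) ++
              [String.ofList (pvSl cs (start + strip) (n + 1 - strip))])
        else pvLoopA cs starts brackets strip fuel (n+1) (inb-1) last start bs be acc
      else pvLoopA cs starts brackets strip fuel (n+1) inb last start bs be acc
    else pvLoopA cs starts brackets strip fuel (n+1) inb last start bs be acc

def bracket_split (source : String) (brackets : List String) (strip : Bool) : List String :=
  pvLoopA source.toList (brackets.map (fun e => e.toList.getD 0 ' ')) brackets
    (if strip then 1 else 0) source.toList.length 0 0 0 0 ' ' ' ' []

-- ===== PORT B =====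
-- b[0]; exact for nonempty b (Pre_ guarantees every bracket string is nonempty)
def pvFirst (b : String) : Char := b.toList.getD 0 ' '

-- open_of = {}; for b in brackets: open_of.setdefault(b[0], b)
def pvOpenOf (brackets : List String) : PySem.Dict Char String :=
  brackets.foldl (fun d b => d.setdefault (pvFirst b) b) PySem.Dict.empty

-- source.find(c, s) for a single char c: first index ≥ s holding c; none = Python's -1.
-- Hand port (exact: all call sites search a single-char needle from a nonnegative start);
-- called with fuel = cs.length - s, so 'fuel = 0' is exactly 'the search ran off the end'.
def pvFindFrom (cs : List Char) (c : Char) : Nat → Nat → Option Nat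
  | 0, _ => none
  | f+1, s => if cs.getD s ' ' = c then some s else pvFindFrom cs c f (s+1)

-- hits = [i for i in (source.find(b[0], last) for b in brackets) if i >= 0]
def pvHits (cs : List Char) (brackets : List String) (last : Nat) : List Nat :=
  brackets.filterMap (fun b => pvFindFrom cs (pvFirst b) (cs.length - last) last)

-- B's inner while loop: jump between occurrences of b_close, keep the first balanced one.
-- source.count(ch, a, b) for a single char ch is ported as (pvSl cs a b).count ch (exact:
-- counting a 1-char substring in a slice = counting the char). fuel bounds the number of
-- jumps; each jump moves right, so cs.length - p jumps always suffice.
def pvFindClose (cs : List Char) (bo bc : Char) (start : Nat) : Nat → Nat → Option Nat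
  | 0, _ => none
  | f+1, p =>
    match pvFindFrom cs bc (cs.length - p) p with
    | none => none
    | some j =>
      if (pvSl cs start j).count bo = (pvSl cs (start+1) (j+1)).count bc then some j
      else pvFindClose cs bo bc start f (j+1)

-- B's outer while True loop; fuel bounds the iteration count (the cursor moves right every
-- round, so cs.length + 1 rounds always suffice)
def pvLoopB (cs : List Char) (d : PySem.Dict Char String) (brackets : List String) (strip : Nat) :
    Nat → Nat → List String → List String
  | 0, last, acc =>
    acc ++ (if last < cs.length then [String.ofList (cs.drop last)] else [])
  | fuel+1, last, acc =>
    match (pvHits cs brackets last).min? with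
    | none => acc ++ (if last < cs.length then [String.ofList (cs.drop last)] else [])
    | some start =>
      let b := ((d.get? (cs.getD start ' ')).getD "").toList
      let bo := b.getD 0 ' '
      let bc := b.getD 1 ' '
      if bo = bc then
        acc ++ (if last < cs.length then [String.ofList (cs.drop last)] else [])
      else
        match pvFindClose cs bo bc start (cs.length - (start+1)) (start+1) with
        | none => acc ++ (if last < cs.length then [String.ofList (cs.drop last)] else [])
        | some j =>
          pvLoopB cs d brackets strip fuel (j+1)
            (acc ++ (if last < start then [String.ofList (pvSl cs last start)] else []) ++
              [String.ofList (pvSl cs (start + strip) (j + 1 - strip))])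

def bracket_split_alt (source : String) (brackets : List String) (strip : Bool) : List String :=
  pvLoopB source.toList (pvOpenOf brackets) brackets (if strip then 1 else 0)
    (source.toList.length + 1) 0 []

-- ===== PRECONDITION & SPEC =====
-- Pre_ excludes inputs on which Python A raises: a bracket string that is empty (IndexError on
-- b[0]) or whose length is not 2 while its first character occurs in source (possible ValueError
-- unpacking b_start, b_end). The second disjunct over-approximates whether that bracket is reached:
-- a wrong-length bracket shadowed by an earlier one with the same first char never raises, but is still excluded.
def Pre_bracket_split (source : String) (brackets : List String) (strip : Bool) : Prop :=
  ∀ b ∈ brackets, b.toList ≠ [] ∧ (b.toList.length = 2 ∨ b.toList.getD 0 ' ' ∉ source.toList)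
instance (source : String) (brackets : List String) (strip : Bool) : Decidable (Pre_bracket_split source brackets strip) := by unfold Pre_bracket_split; infer_instance

def pvWitness_bracket_split : String × List String × Bool := ("a(b{c})d", ["()", "{}"], false)

def Spec_bracket_split (source : String) (brackets : List String) (strip : Bool) (out : List String) : Prop := out = bracket_split_alt source brackets strip
instance (source : String) (brackets : List String) (strip : Bool) (out : List String) : Decidable (Spec_bracket_split source brackets strip out) := by unfold Spec_bracket_split; infer_instance

-- ===== CLAIM (what is proved, stated in full; the proofs are below) =====
def Claim_equal_bracket_split : Prop := ∀ (source : String) (brackets : List String) (strip : Bool), Dom_bracket_split source brackets strip → Pre_bracket_split source brackets strip → Spec_bracket_split source brackets strip (bracket_split source brackets strip)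

-- ===== LEMMAS AND PROOFS =====

-- the dict built by setdefault looks up the FIRST bracket with the given first char
theorem pvOpenOf_get (bl : List String) (d0 : PySem.Dict Char String) (e : Char) :
    (bl.foldl (fun d b => d.setdefault (pvFirst b) b) d0).get? e =
      (d0.get? e).or (bl.find? (fun b => pvFirst b == e)) := by
  induction bl generalizing d0 with
  | nil => simp
  | cons b bl ih =>
    simp only [List.foldl_cons, ih]
    by_cases hb : pvFirst b = e
    · subst hb
      rw [List.find?_cons_of_pos (by simp), PySem.Dict.get?_setdefault_self]
      cases h : d0.get? (pvFirst b) <;> simp [Option.or]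
    · have hset : (d0.setdefault (pvFirst b) b).get? e = d0.get? e := by
        by_cases hc : d0.contains (pvFirst b) = true
        · rw [PySem.Dict.setdefault_of_contains _ _ hc]
        · rw [PySem.Dict.setdefault_of_not_contains _ _ (by simpa using hc),
            PySem.Dict.get?_insert_of_ne _ _ (Ne.symm hb)]
      rw [hset, List.find?_cons_of_neg (by simpa using hb)]

theorem pvOpenOf_contains (bl : List String) (e : Char) :
    (pvOpenOf bl).contains e = true ↔ e ∈ bl.map pvFirst := by
  rw [PySem.Dict.contains_eq_isSome_get?, pvOpenOf, pvOpenOf_get, PySem.Dict.get?_empty,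
    Option.none_or, List.find?_isSome]
  constructor
  · rintro ⟨b, hb, hbe⟩
    exact List.mem_map.mpr ⟨b, hb, by simpa using hbe⟩
  · intro hmem
    obtain ⟨b, hb, hbe⟩ := List.mem_map.mp hmem
    exact ⟨b, hb, by simpa using hbe⟩

-- A's starts.index lookup equals B's dict lookup
theorem pv_find_idx (bl : List String) (e : Char) (he : e ∈ bl.map pvFirst) :
    bl.find? (fun b => pvFirst b == e) = some (bl.getD ((bl.map pvFirst).idxOf e) "") := by
  induction bl with
  | nil => simp at he
  | cons b bl ih =>
    by_cases hb : pvFirst b = e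
    · simp [List.find?_cons, hb]
    · have he' : e ∈ bl.map pvFirst := by
        simp only [List.map_cons, List.mem_cons] at he
        exact he.resolve_left (fun h => hb h.symm)
      simp [List.find?_cons, beq_iff_eq, hb, List.idxOf_cons, Ne.symm hb, ih he']

theorem pv_b_eq (bl : List String) (e : Char) (he : e ∈ bl.map pvFirst) :
    ((pvOpenOf bl).get? e).getD "" = bl.getD ((bl.map pvFirst).idxOf e) "" := by
  rw [pvOpenOf, pvOpenOf_get, PySem.Dict.get?_empty, Option.none_or, pv_find_idx bl e he]
  rfl

-- the dict maps each key to a bracket whose first char IS that key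
theorem pv_first_of_get (bl : List String) (e : Char) (b : String)
    (h : (pvOpenOf bl).get? e = some b) : pvFirst b = e := by
  rw [pvOpenOf, pvOpenOf_get, PySem.Dict.get?_empty, Option.none_or] at h
  simpa using List.find?_some h

-- the two tail yields agree
theorem pv_tail_eq (cs : List Char) (last : Nat) :
    (if pvSl cs last cs.length = [] then ([] : List String) else [String.ofList (pvSl cs last cs.length)]) =
      (if last < cs.length then [String.ofList (cs.drop last)] else []) := by
  have hsl : pvSl cs last cs.length = cs.drop last := by
    simp [pvSl, List.take_of_length_le, List.length_drop]
  rw [hsl]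
  by_cases h : last < cs.length
  · rw [if_pos h, if_neg (by simp [List.drop_eq_nil_iff]; omega)]
  · rw [if_neg h, if_pos (by simp [List.drop_eq_nil_iff]; omega)]

-- the inter-bracket chunk is empty iff last ≥ start (start within range)
theorem pv_chunk_eq (cs : List Char) (last p : Nat) (hp : p < cs.length) :
    (if pvSl cs last p = [] then ([] : List String) else [String.ofList (pvSl cs last p)]) =
      (if last < p then [String.ofList (pvSl cs last p)] else []) := by
  by_cases h : last < p
  · rw [if_pos h, if_neg]
    intro hnil
    have hlen : (pvSl cs last p).length = min (p - last) (cs.length - last) := by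
      simp [pvSl]
    rw [hnil] at hlen
    simp at hlen
    omega
  · rw [if_pos (by simp [pvSl, Nat.sub_eq_zero_of_le (by omega : p ≤ last)]), if_neg h]

-- ---- A's in_bracket = 0 phase is pvSkip (first index whose char is a registered opener) ----
def pvSkip (cs : List Char) (d : PySem.Dict Char String) : Nat → Nat → Nat
  | 0, start => start
  | fuel+1, start =>
    if d.contains (cs.getD start ' ') = false then pvSkip cs d fuel (start+1) else start

theorem pvSkip_ge (cs : List Char) (d : PySem.Dict Char String) (f s : Nat) :
    s ≤ pvSkip cs d f s := by
  induction f generalizing s with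
  | zero => simp [pvSkip]
  | succ f ih =>
    rw [pvSkip]
    split
    · exact le_trans (by omega) (ih (s+1))
    · omega

-- when pvSkip (run with exact fuel) stops inside the string, it stops on an opening character
theorem pvSkip_stop (cs : List Char) (d : PySem.Dict Char String) (f s : Nat)
    (hf : s + f = cs.length) (h : pvSkip cs d f s < cs.length) :
    d.contains (cs.getD (pvSkip cs d f s) ' ') = true := by
  induction f generalizing s with
  | zero => rw [pvSkip] at h ⊢; omega
  | succ f ih =>
    rw [pvSkip] at h ⊢
    by_cases hc : d.contains (cs.getD s ' ') = false
    · rw [if_pos hc] at h ⊢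
      exact ih (s+1) (by omega) h
    · rw [if_neg hc] at h ⊢
      simpa using hc

-- no registered opener strictly before where pvSkip stops
theorem pvSkip_min (cs : List Char) (d : PySem.Dict Char String) (f s : Nat) :
    ∀ i, s ≤ i → i < pvSkip cs d f s → d.contains (cs.getD i ' ') = false := by
  induction f generalizing s with
  | zero => intro i h1 h2; rw [pvSkip] at h2; omega
  | succ f ih =>
    intro i h1 h2
    rw [pvSkip] at h2
    by_cases hc : d.contains (cs.getD s ' ') = false
    · rw [if_pos hc] at h2
      rcases Nat.eq_or_lt_of_le h1 with h | h
      · subst h; exact hc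
      · exact ih (s+1) i h h2
    · rw [if_neg hc] at h2; omega


-- while in_bracket == 0, A scans exactly like pvSkip
theorem pvLoopA_skip (cs : List Char) (brackets : List String) (strip : Nat) :
    ∀ (f n : Nat), n + f = cs.length → ∀ (last start : Nat) (bs be : Char) (acc : List String),
    pvLoopA cs (brackets.map pvFirst) brackets strip f n 0 last start bs be acc =
      (let p := pvSkip cs (pvOpenOf brackets) f n
       if cs.length ≤ p then
         acc ++ (if pvSl cs last cs.length = [] then [] else [String.ofList (pvSl cs last cs.length)])
       else
         let b := (brackets.getD ((brackets.map pvFirst).idxOf (cs.getD p ' ')) "").toList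
         pvLoopA cs (brackets.map pvFirst) brackets strip (cs.length - (p+1)) (p+1) 1 last p
           (b.getD 0 ' ') (b.getD 1 ' ') acc) := by
  intro f
  induction f with
  | zero =>
    intro n hn last start bs be acc
    rw [pvLoopA, pvSkip]
    simp only [if_pos (show cs.length ≤ n from by omega)]
  | succ f ih =>
    intro n hn last start bs be acc
    rw [pvLoopA, pvSkip]
    by_cases hc : (pvOpenOf brackets).contains (cs.getD n ' ') = false
    · have hne : cs.getD n ' ' ∉ brackets.map pvFirst := fun hmem => by
        have hcontains := (pvOpenOf_contains brackets _).mpr hmem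
        rw [hcontains] at hc
        exact absurd hc (by simp)
      rw [if_neg (show ¬((0:Nat) = 0 ∧ cs.getD n ' ' ∈ brackets.map pvFirst) from
            fun hcc => hne hcc.2),
        if_neg (show ¬((0:Nat) ≠ 0) from fun hcc => hcc rfl), if_pos hc]
      exact ih (n+1) (by omega) last start bs be acc
    · have hmem : cs.getD n ' ' ∈ brackets.map pvFirst :=
        (pvOpenOf_contains brackets _).mp (by simpa using hc)
      rw [if_pos (show (0:Nat) = 0 ∧ cs.getD n ' ' ∈ brackets.map pvFirst from ⟨rfl, hmem⟩),
        if_neg hc]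
      simp only [if_neg (show ¬cs.length ≤ n from by omega)]
      have hfuel : cs.length - (n+1) = f := by omega
      rw [hfuel]

-- ---- A's in_bracket ≥ 1 phase is pvMatch ----
def pvMatch (cs : List Char) (bo bc : Char) : Nat → Nat → Nat → Nat
  | 0, j, _depth => j
  | fuel+1, j, depth =>
    let c := cs.getD j ' '
    if c = bo then pvMatch cs bo bc fuel (j+1) (depth+1)
    else if c = bc then (if depth = 1 then j else pvMatch cs bo bc fuel (j+1) (depth-1))
    else pvMatch cs bo bc fuel (j+1) depth


-- while in_bracket ≥ 1, A scans exactly like pvMatch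
theorem pvLoopA_match (cs : List Char) (brackets : List String) (strip : Nat) :
    ∀ (f j inb : Nat), 1 ≤ inb → j + f = cs.length →
    ∀ (last start : Nat) (bs be : Char) (acc : List String),
    pvLoopA cs (brackets.map pvFirst) brackets strip f j inb last start bs be acc =
      (let m := pvMatch cs bs be f j inb
       if cs.length ≤ m then
         acc ++ (if pvSl cs last cs.length = [] then [] else [String.ofList (pvSl cs last cs.length)])
       else
         pvLoopA cs (brackets.map pvFirst) brackets strip (cs.length - (m+1)) (m+1) 0 (m+1) start bs be
           ((acc ++ (if pvSl cs last start = [] then [] else [String.ofList (pvSl cs last start)])) ++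
             [String.ofList (pvSl cs (start + strip) (m + 1 - strip))])) := by
  intro f
  induction f with
  | zero =>
    intro j inb hinb hj last start bs be acc
    rw [pvLoopA, pvMatch]
    simp only [if_pos (show cs.length ≤ j from by omega)]
  | succ f ih =>
    intro j inb hinb hj last start bs be acc
    rw [pvLoopA, pvMatch,
      if_neg (show ¬(inb = 0 ∧ cs.getD j ' ' ∈ brackets.map pvFirst) from fun hc => by omega),
      if_pos (show inb ≠ 0 from by omega)]
    by_cases hbs : cs.getD j ' ' = bs
    · rw [if_pos hbs, if_pos hbs]
      exact ih (j+1) (inb+1) (by omega) (by omega) last start bs be acc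
    · rw [if_neg hbs, if_neg hbs]
      by_cases hbe : cs.getD j ' ' = be
      · rw [if_pos hbe, if_pos hbe]
        by_cases hd : inb = 1
        · subst hd
          rw [if_pos rfl, if_pos rfl]
          simp only [if_neg (show ¬cs.length ≤ j from by omega)]
          have hfuel : cs.length - (j+1) = f := by omega
          rw [hfuel]
        · rw [if_neg hd, if_neg hd]
          exact ih (j+1) (inb-1) (by omega) (by omega) last start bs be acc
      · rw [if_neg hbe, if_neg hbe]
        exact ih (j+1) inb hinb (by omega) last start bs be acc

-- ---- slice-count bookkeeping ----
theorem pvSl_snoc (cs : List Char) (a b : Nat) (hab : a ≤ b) (hb : b < cs.length) :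
    pvSl cs a (b+1) = pvSl cs a b ++ [cs.getD b ' '] := by
  unfold pvSl
  have h1 : b + 1 - a = (b - a) + 1 := by omega
  rw [h1, List.take_succ]
  have h2 : (cs.drop a)[b - a]? = cs[b]? := by
    rw [List.getElem?_drop]; congr 1; omega
  rw [h2, List.getElem?_eq_getElem hb]
  simp [List.getD_eq_getElem?_getD, List.getElem?_eq_getElem hb]

theorem pvSl_cons (cs : List Char) (a b : Nat) (hab : a < b) (ha : a < cs.length) :
    pvSl cs a b = cs.getD a ' ' :: pvSl cs (a+1) b := by
  unfold pvSl
  rw [List.drop_eq_getElem_cons ha]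
  have h1 : b - a = (b - (a+1)) + 1 := by omega
  rw [h1, List.take_succ_cons]
  simp [List.getD_eq_getElem?_getD, List.getElem?_eq_getElem ha]

theorem pvCntSingle (x c : Char) : [x].count c = if x = c then 1 else 0 := by
  by_cases h : x = c
  · subst h; simp
  · simp [List.count_cons, h]

theorem pvCnt_snoc (cs : List Char) (c : Char) (a b : Nat) (hab : a ≤ b) (hb : b < cs.length) :
    (pvSl cs a (b+1)).count c = (pvSl cs a b).count c + (if cs.getD b ' ' = c then 1 else 0) := by
  rw [pvSl_snoc cs a b hab hb, List.count_append, pvCntSingle]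

theorem pvCnt_cons (cs : List Char) (c : Char) (a b : Nat) (hab : a < b) (ha : a < cs.length) :
    (pvSl cs a b).count c = (if cs.getD a ' ' = c then 1 else 0) + (pvSl cs (a+1) b).count c := by
  rw [pvSl_cons cs a b hab ha]
  have : (cs.getD a ' ' :: pvSl cs (a+1) b).count c = (pvSl cs (a+1) b).count c + [cs.getD a ' '].count c := by
    simp [List.count_cons]
  rw [this, pvCntSingle]
  omega

theorem pvCnt_nil (cs : List Char) (c : Char) (a : Nat) : (pvSl cs a a).count c = 0 := by
  simp [pvSl]

-- ---- pvFindFrom specification ----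
theorem pvFindFrom_some (cs : List Char) (c : Char) (f s j : Nat)
    (h : pvFindFrom cs c f s = some j) :
    s ≤ j ∧ j < s + f ∧ cs.getD j ' ' = c ∧ ∀ i, s ≤ i → i < j → cs.getD i ' ' ≠ c := by
  induction f generalizing s with
  | zero => simp [pvFindFrom] at h
  | succ f ih =>
    rw [pvFindFrom] at h
    by_cases hc : cs.getD s ' ' = c
    · rw [if_pos hc] at h
      obtain rfl : s = j := by simpa using h
      exact ⟨le_refl _, by omega, hc, fun i h1 h2 => by omega⟩
    · rw [if_neg hc] at h
      obtain ⟨h1, h2, h3, h4⟩ := ih (s+1) h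
      refine ⟨by omega, by omega, h3, fun i hi1 hi2 => ?_⟩
      rcases Nat.eq_or_lt_of_le hi1 with rfl | hlt
      · exact hc
      · exact h4 i hlt hi2

theorem pvFindFrom_none (cs : List Char) (c : Char) (f s : Nat)
    (h : pvFindFrom cs c f s = none) :
    ∀ i, s ≤ i → i < s + f → cs.getD i ' ' ≠ c := by
  induction f generalizing s with
  | zero => intro i h1 h2; omega
  | succ f ih =>
    rw [pvFindFrom] at h
    by_cases hc : cs.getD s ' ' = c
    · rw [if_pos hc] at h; simp at h
    · rw [if_neg hc] at h
      intro i h1 h2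
      rcases Nat.eq_or_lt_of_le h1 with rfl | hlt
      · exact hc
      · exact ih (s+1) h i hlt (by omega)

-- condition analysis: at j ≥ start+1 with invariant, the cand condition ⇔ (cs[j]=bc ∧ depth=1)

-- if c occurs first at position p (within range), pvFindFrom finds exactly p
theorem pvFindFrom_complete (cs : List Char) (c : Char) :
    ∀ (f s p : Nat), s ≤ p → p < s + f → cs.getD p ' ' = c →
    (∀ i, s ≤ i → i < p → cs.getD i ' ' ≠ c) →
    pvFindFrom cs c f s = some p := by
  intro f
  induction f with
  | zero => intro s p h1 h2; omega
  | succ f ih =>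
    intro s p h1 h2 h3 h4
    rw [pvFindFrom]
    rcases Nat.eq_or_lt_of_le h1 with rfl | hlt
    · rw [if_pos h3]
    · rw [if_neg (h4 s (le_refl _) hlt)]
      exact ih (s+1) p hlt (by omega) h3 (fun i hi1 hi2 => h4 i (by omega) hi2)

-- ---- the joint spec of A's match phase and B's close-jumping loop ----
-- the first candidate position: cs[j] = bc and the span's counts balance (proof-only helper)
def pvCand (cs : List Char) (bo bc : Char) (start : Nat) : Nat → Nat → Option Nat
  | 0, _ => none
  | f+1, j =>
    if cs.getD j ' ' = bc ∧ (pvSl cs start j).count bo = (pvSl cs (start+1) (j+1)).count bc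
    then some j else pvCand cs bo bc start f (j+1)

theorem pvCand_range (cs : List Char) (bo bc : Char) (start : Nat) (f j m : Nat)
    (h : pvCand cs bo bc start f j = some m) : j ≤ m ∧ m < j + f := by
  induction f generalizing j with
  | zero => simp [pvCand] at h
  | succ f ih =>
    rw [pvCand] at h
    split at h
    · obtain rfl : j = m := by simpa using h
      omega
    · obtain ⟨h1, h2⟩ := ih (j+1) h
      omega

-- A's depth scan returns exactly the first candidate (or the length when there is none)
theorem pvMatch_eq_cand (cs : List Char) (bo bc : Char) (start : Nat)
    (hne : bo ≠ bc) (hs : cs.getD start ' ' = bo) :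
    ∀ (f j depth : Nat), j + f = cs.length → start + 1 ≤ j → 1 ≤ depth →
    depth + (pvSl cs (start+1) j).count bc = 1 + (pvSl cs (start+1) j).count bo →
    pvMatch cs bo bc f j depth =
      (match pvCand cs bo bc start f j with
       | some m => m
       | none => cs.length) := by
  intro f
  induction f with
  | zero =>
    intro j depth hj hsj hd hinv
    rw [pvMatch, pvCand]; omega
  | succ f ih =>
    intro j depth hj hsj hd hinv
    have hjlen : j < cs.length := by omega
    have hcnt_bo := pvCnt_snoc cs bo (start+1) j (by omega) hjlen
    have hcnt_bc := pvCnt_snoc cs bc (start+1) j (by omega) hjlen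
    rw [pvMatch, pvCand]
    by_cases hbo : cs.getD j ' ' = bo
    · have hnbc : ¬ cs.getD j ' ' = bc := by rw [hbo]; exact hne
      rw [if_pos hbo, if_neg (by intro hc; exact hnbc hc.1)]
      exact ih (j+1) (depth+1) (by omega) (by omega) (by omega)
        (by rw [hcnt_bo, hcnt_bc, if_pos hbo, if_neg hnbc]; omega)
    · rw [if_neg hbo]
      by_cases hbc : cs.getD j ' ' = bc
      · have hcond_iff : ((pvSl cs start j).count bo = (pvSl cs (start+1) (j+1)).count bc)
            ↔ depth = 1 := by
          rw [pvCnt_cons cs bo start j (by omega) (by omega), if_pos hs, hcnt_bc, if_pos hbc]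
          omega
        rw [if_pos hbc]
        by_cases hd1 : depth = 1
        · rw [if_pos hd1, if_pos ⟨hbc, hcond_iff.mpr hd1⟩]
        · rw [if_neg hd1, if_neg (fun hc => hd1 (hcond_iff.mp hc.2))]
          exact ih (j+1) (depth-1) (by omega) (by omega) (by omega)
            (by rw [hcnt_bo, hcnt_bc, if_pos hbc, if_neg (by rw [hbc]; exact fun h => hne h.symm)]; omega)
      · rw [if_neg hbc, if_neg (by intro hc; exact hbc hc.1)]
        exact ih (j+1) depth (by omega) (by omega) hd
          (by rw [hcnt_bo, hcnt_bc, if_neg hbc, if_neg hbo]; omega)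

-- skipping positions that are not the close char leaves pvCand unchanged

-- skipping positions that are not the close char leaves pvCand unchanged
theorem pvCand_skip (cs : List Char) (bo bc : Char) (start : Nat) :
    ∀ (f p j : Nat), p + f = cs.length → p ≤ j → j ≤ cs.length →
    (∀ i, p ≤ i → i < j → cs.getD i ' ' ≠ bc) →
    pvCand cs bo bc start f p = pvCand cs bo bc start (cs.length - j) j := by
  intro f
  induction f with
  | zero =>
    intro p j hf hpj hjl hno
    obtain rfl : p = j := by omega
    have h0 : cs.length - p = 0 := by omega
    rw [h0]
  | succ f ih =>
    intro p j hf hpj hjl hno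
    rcases Nat.eq_or_lt_of_le hpj with rfl | hlt
    · have : cs.length - p = f + 1 := by omega
      rw [this]
    · rw [pvCand, if_neg (by intro hc; exact hno p (le_refl _) hlt hc.1)]
      exact ih (p+1) j (by omega) (by omega) hjl (fun i h1 h2 => hno i (by omega) h2)

-- B's jumping loop returns exactly the first candidate too
theorem pvFindClose_eq_cand (cs : List Char) (bo bc : Char) (start : Nat) :
    ∀ (f p : Nat), cs.length ≤ p + f →
    pvFindClose cs bo bc start f p = pvCand cs bo bc start (cs.length - p) p := by
  intro f
  induction f with
  | zero =>
    intro p hle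
    have : cs.length - p = 0 := by omega
    rw [pvFindClose, this, pvCand]
  | succ f ih =>
    intro p hle
    rw [pvFindClose]
    by_cases hp : cs.length ≤ p
    · have h0 : cs.length - p = 0 := by omega
      rw [h0, pvFindFrom, pvCand]
    · cases hfind : pvFindFrom cs bc (cs.length - p) p with
      | none =>
        have hno := pvFindFrom_none cs bc (cs.length - p) p hfind
        rw [pvCand_skip cs bo bc start (cs.length - p) p cs.length (by omega) (by omega)
          (le_refl _) (fun i h1 h2 => hno i h1 (by omega))]
        have : cs.length - cs.length = 0 := by omega
        rw [this, pvCand]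
      | some j =>
        obtain ⟨h1, h2, h3, h4⟩ := pvFindFrom_some cs bc (cs.length - p) p j hfind
        have hjlen : j < cs.length := by omega
        change (if (pvSl cs start j).count bo = (pvSl cs (start+1) (j+1)).count bc then some j
            else pvFindClose cs bo bc start f (j+1)) = _
        rw [pvCand_skip cs bo bc start (cs.length - p) p j (by omega) h1 (by omega) h4]
        have hj1 : cs.length - j = (cs.length - (j+1)) + 1 := by omega
        rw [hj1, pvCand]
        by_cases hcond : (pvSl cs start j).count bo = (pvSl cs (start+1) (j+1)).count bc
        · rw [if_pos hcond, if_pos ⟨h3, hcond⟩]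
        · rw [if_neg hcond, if_neg (by intro hc; exact hcond hc.2)]
          rw [ih (j+1) (by omega)]

-- a pair whose open and close chars coincide never closes in A
theorem pvMatch_same (cs : List Char) (bo : Char) (f j depth : Nat) :
    pvMatch cs bo bo f j depth = j + f := by
  induction f generalizing j depth with
  | zero => simp [pvMatch]
  | succ f ih =>
    rw [pvMatch]
    by_cases hc : cs.getD j ' ' = bo
    · rw [if_pos hc]; rw [ih]; omega
    · rw [if_neg hc, if_neg hc]; rw [ih]; omega

-- B's min-of-finds equals A's left-to-right skip
theorem pvHits_min (cs : List Char) (brackets : List String) (last : Nat)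
    (hlast : last ≤ cs.length) :
    (pvHits cs brackets last).min? =
      (if pvSkip cs (pvOpenOf brackets) (cs.length - last) last < cs.length
       then some (pvSkip cs (pvOpenOf brackets) (cs.length - last) last) else none) := by
  have hge := pvSkip_ge cs (pvOpenOf brackets) (cs.length - last) last
  by_cases hp : pvSkip cs (pvOpenOf brackets) (cs.length - last) last < cs.length
  · rw [if_pos hp]
    have hc := pvSkip_stop cs (pvOpenOf brackets) (cs.length - last) last (by omega) hp
    have hmem := (pvOpenOf_contains brackets _).mp hc
    obtain ⟨b, hb, hfb⟩ := List.mem_map.mp hmem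
    have hfind : pvFindFrom cs (pvFirst b) (cs.length - last) last =
        some (pvSkip cs (pvOpenOf brackets) (cs.length - last) last) := by
      refine pvFindFrom_complete cs (pvFirst b) (cs.length - last) last _ hge (by omega)
        hfb.symm (fun i h1 h2 hceq => ?_)
      have hno := pvSkip_min cs (pvOpenOf brackets) (cs.length - last) last i h1 h2
      have : (pvOpenOf brackets).contains (cs.getD i ' ') = true :=
        (pvOpenOf_contains brackets _).mpr (hceq ▸ List.mem_map.mpr ⟨b, hb, rfl⟩)
      rw [this] at hno
      exact absurd hno (by simp)
    rw [List.min?_eq_some_iff]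
    constructor
    · exact List.mem_filterMap.mpr ⟨b, hb, hfind⟩
    · intro x hx
      obtain ⟨b', hb', hf'⟩ := List.mem_filterMap.mp hx
      obtain ⟨hx1, hx2, hx3, _⟩ := pvFindFrom_some cs (pvFirst b') (cs.length - last) last x hf'
      by_contra hlt
      have hno := pvSkip_min cs (pvOpenOf brackets) (cs.length - last) last x hx1 (by omega)
      have : (pvOpenOf brackets).contains (cs.getD x ' ') = true :=
        (pvOpenOf_contains brackets _).mpr (hx3 ▸ List.mem_map.mpr ⟨b', hb', rfl⟩)
      rw [this] at hno
      exact absurd hno (by simp)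
  · rw [if_neg hp]
    have hnil : pvHits cs brackets last = [] := by
      rw [pvHits, List.filterMap_eq_nil_iff]
      intro b hb
      cases hf : pvFindFrom cs (pvFirst b) (cs.length - last) last with
      | none => rfl
      | some x =>
        exfalso
        obtain ⟨hx1, hx2, hx3, _⟩ := pvFindFrom_some cs (pvFirst b) (cs.length - last) last x hf
        have hno := pvSkip_min cs (pvOpenOf brackets) (cs.length - last) last x hx1 (by omega)
        have : (pvOpenOf brackets).contains (cs.getD x ' ') = true :=
          (pvOpenOf_contains brackets _).mpr (hx3 ▸ List.mem_map.mpr ⟨b, hb, rfl⟩)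
        rw [this] at hno
        exact absurd hno (by simp)
    rw [hnil]
    rfl

-- main loop correspondence, by induction on B's iteration fuel
theorem pv_main (cs : List Char) (brackets : List String) (strip : Nat) :
    ∀ (fb last : Nat), cs.length + 1 - last ≤ fb → last ≤ cs.length →
    ∀ (start : Nat) (bs be : Char) (acc : List String),
      pvLoopA cs (brackets.map pvFirst) brackets strip (cs.length - last) last 0 last start bs be acc =
        pvLoopB cs (pvOpenOf brackets) brackets strip fb last acc := by
  intro fb
  induction fb with
  | zero => intro last hfb hlast; omega
  | succ fb ih =>
    intro last hfb hlast start bs be acc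
    rw [pvLoopA_skip cs brackets strip (cs.length - last) last (by omega), pvLoopB,
      pvHits_min cs brackets last hlast]
    set p := pvSkip cs (pvOpenOf brackets) (cs.length - last) last with hpdef
    have hge : last ≤ p := pvSkip_ge cs (pvOpenOf brackets) (cs.length - last) last
    by_cases hp : p < cs.length
    · rw [if_pos hp]
      simp only [if_neg (not_le.mpr hp)]
      have hcont : (pvOpenOf brackets).contains (cs.getD p ' ') = true :=
        pvSkip_stop cs (pvOpenOf brackets) (cs.length - last) last (by omega) hp
      have hmem : cs.getD p ' ' ∈ brackets.map pvFirst := (pvOpenOf_contains brackets _).mp hcont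
      -- the bracket string both sides pick
      have hbeq : ((pvOpenOf brackets).get? (cs.getD p ' ')).getD "" =
          brackets.getD ((brackets.map pvFirst).idxOf (cs.getD p ' ')) "" :=
        pv_b_eq brackets _ hmem
      obtain ⟨bstr, hget⟩ : ∃ b, (pvOpenOf brackets).get? (cs.getD p ' ') = some b := by
        rw [PySem.Dict.contains_eq_isSome_get?] at hcont
        exact Option.isSome_iff_exists.mp hcont
      have hfirst : pvFirst bstr = cs.getD p ' ' := pv_first_of_get brackets _ bstr hget
      rw [hget] at hbeq
      simp only [Option.getD_some] at hbeq
      set bo := bstr.toList.getD 0 ' ' with hbo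
      set bc := bstr.toList.getD 1 ' ' with hbc
      have hA : (brackets.getD ((brackets.map pvFirst).idxOf (cs.getD p ' ')) "").toList = bstr.toList := by
        rw [← hbeq]
      simp only [hget, Option.getD_some, hA, ← hbo, ← hbc]
      have hfirst' : cs.getD p ' ' = bo := by rw [← hfirst]; rfl
      by_cases hsame : bo = bc
      · rw [if_pos hsame]
        rw [pvLoopA_match cs brackets strip (cs.length - (p+1)) (p+1) 1 le_rfl (by omega)]
        have hm : pvMatch cs bo bc (cs.length - (p+1)) (p+1) 1 = cs.length := by
          rw [← hsame, pvMatch_same]; omega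
        rw [← hsame] at hm ⊢
        simp only [hm, le_refl, if_pos, pv_tail_eq]
      · rw [if_neg hsame]
        rw [pvLoopA_match cs brackets strip (cs.length - (p+1)) (p+1) 1 le_rfl (by omega)]
        have hm := pvMatch_eq_cand cs bo bc p hsame hfirst' (cs.length - (p+1)) (p+1) 1
          (by omega) (by omega) (by omega)
          (by rw [pvCnt_nil, pvCnt_nil])
        have hfc := pvFindClose_eq_cand cs bo bc p (cs.length - (p+1)) (p+1) (by omega)
        have hfuel : cs.length - (p+1) = cs.length - (p+1) := rfl
        cases hcand : pvCand cs bo bc p (cs.length - (p+1)) (p+1) with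
        | none =>
          rw [hcand] at hm hfc
          simp only [hm, hfc, le_refl, if_pos, pv_tail_eq]
        | some m0 =>
          rw [hcand] at hm hfc
          obtain ⟨hm1, hm2⟩ := pvCand_range cs bo bc p (cs.length - (p+1)) (p+1) m0 hcand
          have hm0len : m0 < cs.length := by omega
          simp only [hm, hfc, if_neg (not_le.mpr hm0len)]
          rw [pv_chunk_eq cs last p hp, List.append_assoc]
          exact ih (m0+1) (by omega) (by omega) p bo bc _
    · rw [if_neg hp]
      simp only [if_pos (not_lt.mp hp), pv_tail_eq]

-- ===== VERDICT (by name: the statement is the Claim_ definition above) =====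
theorem bracket_split_spec : Claim_equal_bracket_split := by
  intro source brackets strip _ _
  unfold Spec_bracket_split bracket_split bracket_split_alt
  exact pv_main source.toList brackets (if strip then 1 else 0) (source.toList.length + 1) 0
    (by omega) (by omega) 0 ' ' ' ' []
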